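-- pv_equiv track=rewrite | github.com/jjjj17/enroutesalute | enroutesalute.py | solution
-- ===== SOURCE A (Python) =====
-- def solution(s):
--     salutes = 0
--     for x in range(0,len(s)):
--         pos = s[x]
--         left_space = s[:x]
--         right_space = s[x+1:]
--         if pos == '>':
--             opp = right_space.count('<')
--             salutes += opp
--         elif pos == '<':
--             opp2 = left_space.count('>')
--             salutes += opp2
--     return(salutes)
-- ===== SOURCE B (Python) =====
-- def solution(s):
--     # Single pass: keep a running count of '>' seen so far; each '<' forms a
--     # pair with every earlier '>', and each pair is counted twice (once from
--     # each side), so add 2 * count per '<'.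
--     salutes = 0
--     gt = 0
--     for c in s:
--         if c == '>':
--             gt += 1
--         elif c == '<':
--             salutes += 2 * gt
--     return salutes
-- ===== Notes on version B (the rewrite author's own statement) =====
-- stated objective: faster
-- what changed: Replaced the per-index loop that slices the string and re-counts '<'/'>' in each slice with a single left-to-right pass keeping a running count of '>' and adding 2*count at each '<'.
import Mathlib
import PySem

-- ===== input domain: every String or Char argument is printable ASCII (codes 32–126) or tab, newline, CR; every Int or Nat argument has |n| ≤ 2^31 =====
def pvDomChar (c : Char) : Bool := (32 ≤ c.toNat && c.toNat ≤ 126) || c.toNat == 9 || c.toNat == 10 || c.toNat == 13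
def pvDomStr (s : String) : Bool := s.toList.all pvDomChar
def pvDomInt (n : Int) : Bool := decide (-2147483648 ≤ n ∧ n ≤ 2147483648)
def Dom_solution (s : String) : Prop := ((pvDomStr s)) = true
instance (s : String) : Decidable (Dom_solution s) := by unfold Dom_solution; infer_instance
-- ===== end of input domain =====

-- B replaces A's quadratic slice-and-recount loop by one linear pass with a running '>' count.

-- ===== PORT A =====
def solution (s : String) : Int :=
  (PySem.List.pyRange 0 (PySem.Str.len s) 1).foldl
    (fun salutes x =>
      let pos := PySem.Str.pyGet? s x
      let left_space := PySem.Str.slice s none (some x)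
      let right_space := PySem.Str.slice s (some (x + 1)) none
      if pos = some '>' then salutes + (PySem.Str.count right_space "<" : Int)
      else if pos = some '<' then salutes + (PySem.Str.count left_space ">" : Int)
      else salutes) 0

-- ===== PORT B =====
def solution_alt (s : String) : Int :=
  (s.toList.foldl
    (fun (st : Int × Int) c =>
      if c = '>' then (st.1 + 1, st.2)
      else if c = '<' then (st.1, st.2 + 2 * st.1)
      else st) (0, 0)).2

-- ===== PRECONDITION & SPEC =====
def Spec_solution (s : String) (out : Int) : Prop := out = solution_alt s
instance (s : String) (out : Int) : Decidable (Spec_solution s out) := by unfold Spec_solution; infer_instance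

-- ===== CLAIM (what is proved, stated in full; the proofs are below) =====
def Claim_equal_solution : Prop := ∀ (s : String), Dom_solution s → Spec_solution s (solution s)

-- ===== LEMMAS AND PROOFS =====

-- str.count with a single-character needle is List.count
theorem chars_count_go_singleton (c : Char) : ∀ (fuel : Nat) (l : List Char) (acc : Nat),
    l.length ≤ fuel → PySem.Chars.count.go [c] fuel l acc = acc + l.count c := by
  intro fuel
  induction fuel with
  | zero =>
      intro l acc h
      have : l = [] := List.eq_nil_of_length_eq_zero (Nat.le_zero.mp h)
      subst this; simp [PySem.Chars.count.go]
  | succ n ih =>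
      intro l acc h
      cases l with
      | nil => simp [PySem.Chars.count.go]
      | cons hd t =>
          by_cases hc : c = hd
          · subst hc
            simp only [PySem.Chars.count.go, List.isPrefixOf, BEq.rfl,
              Bool.and_self, if_true]
            rw [ih _ _ (by simpa using Nat.le_of_succ_le_succ h)]
            simp
            omega
          · have hbeq : (c == hd) = false := by simp [hc]
            simp only [PySem.Chars.count.go, List.isPrefixOf, hbeq, Bool.false_and, if_neg,
              Bool.false_eq_true, not_false_iff]
            rw [ih _ _ (by simpa using Nat.le_of_succ_le_succ h)]
            simp [Ne.symm hc]

theorem chars_count_singleton (l : List Char) (c : Char) :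
    PySem.Chars.count l [c] = l.count c := by
  unfold PySem.Chars.count
  simp only [List.isEmpty_cons, if_neg, Bool.false_eq_true, not_false_iff]
  simpa using chars_count_go_singleton c l.length l 0 le_rfl

-- A's per-index contribution, over the list of characters
def termA (l : List Char) (x : Int) : Int :=
  let pos := PySem.List.pyGet? l x
  if pos = some '>' then ((PySem.List.slice l (some (x + 1)) none).count '<' : Int)
  else if pos = some '<' then ((PySem.List.slice l none (some x)).count '>' : Int)
  else 0

def specA (l : List Char) : Int :=
  ((PySem.List.pyRange 0 (l.length : Int) 1).map (termA l)).sum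

-- the body of A's loop is "accumulate termA"
theorem solution_eq_specA (s : String) : solution s = specA s.toList := by
  unfold solution specA
  rw [List.foldl_ext (g := fun sal x => sal + termA s.toList x)]
  · rw [PySem.List.foldl_add]
    simp [PySem.Str.len_eq]
  · intro a x _
    simp only [termA, PySem.Str.pyGet?_eq, PySem.Chars.pyGet?_eq_listPyGet?, PySem.Str.count_eq,
      PySem.Str.toList_slice, PySem.Chars.slice_eq_listSlice]
    have e1 : ("<" : String).toList = ['<'] := rfl
    have e2 : (">" : String).toList = ['>'] := rfl
    rw [e1, e2, chars_count_singleton, chars_count_singleton]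
    split_ifs <;> simp

theorem sum_indicator_range (l : List Char) (v : Char) :
    ((List.range l.length).map (fun k => if l[k]? = some v then (1 : Int) else 0)).sum
      = (l.count v : Int) := by
  induction l using List.reverseRecOn with
  | nil => simp
  | append_singleton t c ih =>
      rw [List.length_append, List.length_cons, List.length_nil, Nat.zero_add,
        List.range_succ, List.map_append, List.sum_append]
      have h1 : ((List.range t.length).map
          (fun k => if (t ++ [c])[k]? = some v then (1 : Int) else 0)).sum
          = ((List.range t.length).map (fun k => if t[k]? = some v then (1 : Int) else 0)).sum := by
        congr 1
        apply List.map_congr_left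
        intro k hk
        rw [List.getElem?_append_left (List.mem_range.mp hk)]
      rw [h1, ih]
      have h2 : (t ++ [c])[t.length]? = some c := by
        rw [List.getElem?_append_right le_rfl]; simp
      simp [List.count_append, List.count_singleton]

theorem specA_snoc (l : List Char) (c : Char) :
    specA (l ++ [c]) = specA l + (if c = '<' then 2 * (l.count '>' : Int) else 0) := by
  unfold specA
  have hn : (((l ++ [c]).length : Nat) : Int) = (l.length : Int) + 1 := by simp
  rw [hn, PySem.List.pyRange_one_succ_right (by positivity), List.map_append, List.sum_append]
  -- the new last index contributes count('>', l) when c = '<'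
  have hlast : termA (l ++ [c]) (l.length : Int)
      = (if c = '<' then (l.count '>' : Int) else 0) := by
    unfold termA
    have hg : PySem.List.pyGet? (l ++ [c]) ((l.length : Nat) : Int) = some c := by
      rw [PySem.List.pyGet?_natCast]
      rw [List.getElem?_append_right le_rfl]; simp
    have hr : PySem.List.slice (l ++ [c]) (some ((l.length : Int) + 1)) none = [] := by
      have : (l.length : Int) + 1 = (((l.length + 1 : Nat)) : Int) := by push_cast; ring
      rw [this, PySem.List.slice_from_natCast]
      simp
    have hl : PySem.List.slice (l ++ [c]) none (some ((l.length : Nat) : Int)) = l := by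
      rw [PySem.List.slice_to_natCast]
      exact List.take_append_of_le_length le_rfl ▸ (by simp)
    rw [hg, hr, hl]
    by_cases h1 : c = '>'
    · simp [h1]
    · by_cases h2 : c = '<' <;> simp [h1, h2]
  -- every old index x < l.length gains 1 exactly when s[x] = '>' and c = '<'
  have hmap : (PySem.List.pyRange 0 (l.length : Int) 1).map (termA (l ++ [c]))
      = (PySem.List.pyRange 0 (l.length : Int) 1).map
          (fun x => termA l x +
            (if PySem.List.pyGet? l x = some '>' ∧ c = '<' then 1 else 0)) := by
    apply List.map_congr_left
    intro x hx
    have hb := PySem.List.mem_pyRange_one.mp hx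
    obtain ⟨k, rfl⟩ : ∃ k : Nat, ((k : Nat) : Int) = x := ⟨x.toNat, Int.toNat_of_nonneg hb.1⟩
    have hk : k < l.length := by exact_mod_cast hb.2
    unfold termA
    have hg : PySem.List.pyGet? (l ++ [c]) ((k : Nat) : Int) = l[k]? := by
      rw [PySem.List.pyGet?_natCast, List.getElem?_append_left hk]
    have hg' : PySem.List.pyGet? l ((k : Nat) : Int) = l[k]? := by
      rw [PySem.List.pyGet?_natCast]
    have hr : PySem.List.slice (l ++ [c]) (some (((k : Nat) : Int) + 1)) none
        = PySem.List.slice l (some (((k : Nat) : Int) + 1)) none ++ [c] := by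
      have e : ((k : Nat) : Int) + 1 = (((k + 1 : Nat)) : Int) := by push_cast; ring
      rw [e, PySem.List.slice_from_natCast, PySem.List.slice_from_natCast]
      exact List.drop_append_of_le_length hk
    have hl' : PySem.List.slice (l ++ [c]) none (some ((k : Nat) : Int))
        = PySem.List.slice l none (some ((k : Nat) : Int)) := by
      rw [PySem.List.slice_to_natCast, PySem.List.slice_to_natCast]
      exact List.take_append_of_le_length (Nat.le_of_lt hk)
    rw [hg, hg', hr, hl']
    by_cases h1 : l[k]? = some '>'
    · by_cases h2 : c = '<' <;>
        simp [h1, h2, List.count_append]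
    · by_cases h2 : l[k]? = some '<' <;> simp [h1, h2]
  rw [hmap, PySem.List.sum_map_add_int]
  have hsing : ((List.map (termA (l ++ [c])) [(l.length : Int)]).sum : Int)
      = (if c = '<' then (l.count '>' : Int) else 0) := by
    simpa using hlast
  rw [hsing]
  by_cases hc : c = '<'
  · have hind : ((PySem.List.pyRange 0 (l.length : Int) 1).map
        (fun x => if PySem.List.pyGet? l x = some '>' ∧ c = '<' then (1 : Int) else 0)).sum
        = (l.count '>' : Int) := by
      rw [PySem.List.pyRange_one]
      rw [List.map_map]
      have e : ((fun x => if PySem.List.pyGet? l x = some '>' ∧ c = '<' then (1 : Int) else 0) ∘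
          fun k : Nat => (0 : Int) + (k : Int))
          = fun k : Nat => if l[k]? = some '>' then (1 : Int) else 0 := by
        funext k
        simp [hc, PySem.List.pyGet?_natCast]
      rw [show ((l.length : Int) - 0).toNat = l.length by simp, e]
      exact sum_indicator_range l '>'
    rw [hind]
    simp only [hc, if_true]
    ring
  · have hind : ((PySem.List.pyRange 0 (l.length : Int) 1).map
        (fun x => if PySem.List.pyGet? l x = some '>' ∧ c = '<' then (1 : Int) else 0)).sum
        = 0 := by
      simp [hc]
    rw [hind]
    simp [hc]

def stepB (st : Int × Int) (c : Char) : Int × Int :=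
  if c = '>' then (st.1 + 1, st.2)
  else if c = '<' then (st.1, st.2 + 2 * st.1)
  else st

theorem foldB_fst (l : List Char) (st : Int × Int) :
    (l.foldl stepB st).1 = st.1 + (l.count '>' : Int) := by
  induction l generalizing st with
  | nil => simp
  | cons h t ih =>
      rw [List.foldl_cons, ih]
      unfold stepB
      by_cases h1 : h = '>'
      · simp [h1]; ring
      · by_cases h2 : h = '<' <;> simp [h1, h2]

theorem specA_eq_foldB (l : List Char) : specA l = (l.foldl stepB (0, 0)).2 := by
  induction l using List.reverseRecOn with
  | nil => simp [specA, PySem.List.pyRange_one_eq_nil]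
  | append_singleton t c ih =>
      rw [specA_snoc, ih, List.foldl_append, List.foldl_cons, List.foldl_nil]
      by_cases h1 : c = '>'
      · simp [stepB, h1]
      · by_cases h2 : c = '<'
        · simp [stepB, h2, foldB_fst]
        · simp [stepB, h1, h2]

-- ===== VERDICT (by name: the statement is the Claim_ definition above) =====
theorem solution_spec : Claim_equal_solution := by
  intro s _
  unfold Spec_solution
  rw [solution_eq_specA, specA_eq_foldB]
  rfl
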